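-- pv_equiv track=rewrite | github.com/Atharva-K12/py2048 | 2048.py | shifting
-- ===== SOURCE A (Python) =====
-- def shifting(board,n):
--     #shifts the non zero board values to right
--     #sets a flag if nothing changed
-- 	flag=0
-- 	temp=[[0 for i in range(n)] for j in range(n)]
-- 	for i in range(n):
-- 		c=0
-- 		for j in range(n):
-- 			if board[i][j]!=0:
-- 				temp[i][n-c-1]=board[i][j]
-- 				c+=1
-- 	if temp==board:
-- 		flag=1
-- 	return (temp,flag)
-- ===== SOURCE B (Python) =====
-- def shifting(board, n):
--     # shift nonzeros right by STABLE-SORTING each reversed row by zero-ness: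
--     # False (zeros) sorts before True (nonzeros), and stability keeps the
--     # reversed nonzeros in the order A's scatter produces.
--     temp = [sorted(board[i][:n][::-1], key=lambda x: x != 0) for i in range(n)]
--     return (temp, 1 if temp == board else 0)
-- ===== Notes on version B (the rewrite author's own statement) =====
-- stated objective: idiomatic
-- what changed: Each output row is obtained by stable-sorting the reversed row with boolean key x != 0 (zeros sort first, stability keeps the reversed nonzeros in order), replacing A's preallocated n-by-n grid mutated by a counter-driven scatter.
import Mathlib
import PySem

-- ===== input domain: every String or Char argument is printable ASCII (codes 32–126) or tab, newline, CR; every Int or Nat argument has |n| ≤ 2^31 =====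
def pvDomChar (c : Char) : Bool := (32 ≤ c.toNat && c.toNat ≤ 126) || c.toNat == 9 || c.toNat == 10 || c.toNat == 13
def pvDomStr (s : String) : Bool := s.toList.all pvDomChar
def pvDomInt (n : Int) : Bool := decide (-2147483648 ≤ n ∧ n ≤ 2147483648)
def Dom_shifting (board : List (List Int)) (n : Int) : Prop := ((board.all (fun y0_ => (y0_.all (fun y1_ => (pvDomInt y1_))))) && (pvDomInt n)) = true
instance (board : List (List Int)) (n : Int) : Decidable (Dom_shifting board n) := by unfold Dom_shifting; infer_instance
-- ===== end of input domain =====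

-- B computes each output row by stable-sorting the reversed row with boolean key x != 0
-- (zeros first, nonzeros keep their reversed order), instead of A's counter-driven scatter
-- into a preallocated n×n grid; same behaviour, a genuinely different mechanism.

-- ===== PORT A =====
def shifting (board : List (List Int)) (n : Int) : List (List Int) × Int :=
  let temp0 : List (List Int) :=
    (PySem.List.pyRange 0 n 1).map (fun _ => (PySem.List.pyRange 0 n 1).map (fun _ => (0 : Int)))
  let temp :=
    (PySem.List.pyRange 0 n 1).foldl
      (fun temp i =>
        ((PySem.List.pyRange 0 n 1).foldl
          (fun (tc : List (List Int) × Int) j =>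
            if PySem.List.pyGetD (PySem.List.pyGetD board i []) j 0 ≠ 0 then
              (PySem.List.pySetD tc.1 i
                 (PySem.List.pySetD (PySem.List.pyGetD tc.1 i []) (n - tc.2 - 1)
                    (PySem.List.pyGetD (PySem.List.pyGetD board i []) j 0)),
               tc.2 + 1)
            else tc)
          (temp, (0 : Int))).1)
      temp0
  (temp, if temp = board then (1 : Int) else 0)

-- ===== PORT B =====
-- key=lambda x: x != 0 is the Bool key 'fun x => decide (x ≠ 0)': Python's False < True is Bool's <;
-- board[i][:n][::-1] is slice-then-List.reverse (exact).
def shifting_alt (board : List (List Int)) (n : Int) : List (List Int) × Int :=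
  let temp :=
    (PySem.List.pyRange 0 n 1).map (fun i =>
      PySem.List.sorted ((PySem.List.slice (PySem.List.pyGetD board i []) none (some n)).reverse)
        (fun x => decide (x ≠ 0)) false)
  (temp, if temp = board then (1 : Int) else 0)

-- ===== PRECONDITION & SPEC =====
-- Pre_ excludes exactly the inputs on which A raises IndexError (board[i] or board[i][j]
-- out of range for some i, j < n); A returns on every admitted input.
def Pre_shifting (board : List (List Int)) (n : Int) : Prop :=
  n ≤ (board.length : Int) ∧ ∀ row ∈ board.take n.toNat, n ≤ (row.length : Int)
instance (board : List (List Int)) (n : Int) : Decidable (Pre_shifting board n) := by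
  unfold Pre_shifting; infer_instance
def pvWitness_shifting : List (List Int) × Int := ([[1, 2], [0, 3]], 2)

def Spec_shifting (board : List (List Int)) (n : Int) (out : List (List Int) × Int) : Prop :=
  out = shifting_alt board n
instance (board : List (List Int)) (n : Int) (out : List (List Int) × Int) :
    Decidable (Spec_shifting board n out) := by unfold Spec_shifting; infer_instance

-- ===== CLAIM (what is proved, stated in full; the proofs are below) =====
def Claim_equal_shifting : Prop := ∀ (board : List (List Int)) (n : Int),
  Dom_shifting board n → Pre_shifting board n → Spec_shifting board n (shifting board n)

-- ===== LEMMAS AND PROOFS =====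

-- proof-only helpers: the nonzero entries of the first n cells of a row, and the row both
-- programs produce from them
def pvVals (n : Int) (r : List Int) : List Int := (r.take n.toNat).filter (fun x => decide (x ≠ 0))

def pvRow (n : Int) (r : List Int) : List Int :=
  List.replicate (n.toNat - (pvVals n r).length) 0 ++ (pvVals n r).reverse

theorem pv_set_pad (p : Nat) (hp : 0 < p) (l : List Int) (v : Int) :
    (List.replicate p (0:Int) ++ l).set (p-1) v = List.replicate (p-1) 0 ++ v :: l := by
  conv_lhs => rw [show p = (p-1)+1 by omega, List.replicate_succ' (n := p-1)]
  rw [List.append_assoc, List.set_append_right _ _ (by simp)]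
  simp

-- A's inner loop: after scanning the first m cells of row r, temp's row K holds the zeros
-- followed by the reversed nonzeros seen so far, and c counts them.
theorem pv_inner (n : Int) (hn : 0 ≤ n) (r : List Int) (hr : n ≤ (r.length : Int))
    (t : List (List Int)) (K : Nat) (hK : K < t.length)
    (ht : t[K] = List.replicate n.toNat (0:Int)) :
    ∀ (m : Nat), m ≤ n.toNat →
    (PySem.List.pyRange 0 (m:Int) 1).foldl
      (fun (tc : List (List Int) × Int) j =>
        if PySem.List.pyGetD r j 0 ≠ 0 then
          (PySem.List.pySetD tc.1 (K:Int)
             (PySem.List.pySetD (PySem.List.pyGetD tc.1 (K:Int) []) (n - tc.2 - 1)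
                (PySem.List.pyGetD r j 0)),
           tc.2 + 1)
        else tc)
      (t, 0)
    = (t.set K (List.replicate (n.toNat - ((r.take m).filter (fun x => decide (x ≠ 0))).length) 0
                ++ ((r.take m).filter (fun x => decide (x ≠ 0))).reverse),
       (((r.take m).filter (fun x => decide (x ≠ 0))).length : Int)) := by
  have hrN : n.toNat ≤ r.length := by omega
  intro m
  induction m with
  | zero =>
    intro _
    rw [show PySem.List.pyRange 0 ((0:Nat):Int) 1 = [] from
      PySem.List.pyRange_one_eq_nil (by omega)]
    simp [← ht, List.set_getElem_self hK]
  | succ m ih =>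
    intro hm1
    have hm : m ≤ n.toNat := by omega
    have hmr : m < r.length := by omega
    have hcnt : ((r.take m).filter (fun x => decide (x ≠ 0))).length ≤ m :=
      le_trans (List.length_filter_le _ _) (by simp [List.length_take])
    have hrng : PySem.List.pyRange 0 ((m+1 : Nat) : Int) 1
        = PySem.List.pyRange 0 (m : Int) 1 ++ [(m : Int)] := by
      push_cast
      exact PySem.List.pyRange_one_succ_right (by omega)
    have htake : r.take (m+1) = r.take m ++ [r[m]] := by
      rw [List.take_add_one, List.getElem?_eq_getElem hmr]; rfl
    rw [hrng, List.foldl_append, ih hm]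
    simp only [List.foldl_cons, List.foldl_nil]
    have hget : PySem.List.pyGetD r (m : Int) 0 = r[m] := by
      rw [PySem.List.pyGetD_natCast]; exact List.getD_eq_getElem _ _ hmr
    by_cases h0 : r[m] = 0
    · rw [if_neg (by rw [hget]; simpa using h0)]
      rw [htake]
      simp [h0]
    · rw [if_pos (by rw [hget]; simpa using h0)]
      have hrow : PySem.List.pyGetD
          (t.set K (List.replicate (n.toNat - ((r.take m).filter (fun x => decide (x ≠ 0))).length) 0
            ++ ((r.take m).filter (fun x => decide (x ≠ 0))).reverse)) (K : Int) []
          = List.replicate (n.toNat - ((r.take m).filter (fun x => decide (x ≠ 0))).length) 0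
            ++ ((r.take m).filter (fun x => decide (x ≠ 0))).reverse := by
        rw [PySem.List.pyGetD_natCast, List.getD_eq_getElem _ _ (by simpa using hK),
            List.getElem_set_self (by simpa using hK)]
      rw [hrow, hget]
      have hpos : 0 ≤ n - ((r.take m).filter (fun x => decide (x ≠ 0))).length - 1 := by omega
      rw [PySem.List.pySetD_of_nonneg _ _ hpos]
      have htn : (n - ((r.take m).filter (fun x => decide (x ≠ 0))).length - 1).toNat
          = (n.toNat - ((r.take m).filter (fun x => decide (x ≠ 0))).length) - 1 := by omega
      rw [htn, pv_set_pad _ (by omega) _ _, PySem.List.pySetD_natCast _ K _, List.set_set]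
      rw [htake]
      simp only [List.filter_append, List.filter_cons, List.filter_nil]
      rw [if_pos (by simpa using h0)]
      simp only [List.length_append, List.length_cons, List.length_nil, List.reverse_append,
        List.reverse_cons, List.reverse_nil, List.nil_append, List.cons_append]
      simp [Nat.sub_sub]

-- A's outer loop: after k rows, temp is the k transformed rows followed by untouched zero rows.
theorem pv_outer (board : List (List Int)) (n : Int) (hn : 0 ≤ n)
    (hb : n ≤ (board.length : Int))
    (hrows : ∀ row ∈ board.take n.toNat, n ≤ (row.length : Int)) :
    ∀ (k : Nat), k ≤ n.toNat →
    (PySem.List.pyRange 0 (k:Int) 1).foldl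
      (fun temp i =>
        ((PySem.List.pyRange 0 n 1).foldl
          (fun (tc : List (List Int) × Int) j =>
            if PySem.List.pyGetD (PySem.List.pyGetD board i []) j 0 ≠ 0 then
              (PySem.List.pySetD tc.1 i
                 (PySem.List.pySetD (PySem.List.pyGetD tc.1 i []) (n - tc.2 - 1)
                    (PySem.List.pyGetD (PySem.List.pyGetD board i []) j 0)),
               tc.2 + 1)
            else tc)
          (temp, (0:Int))).1)
      (List.replicate n.toNat (List.replicate n.toNat (0:Int)))
    = ((PySem.List.pyRange 0 (k:Int) 1).map (fun i => pvRow n (PySem.List.pyGetD board i [])))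
      ++ List.replicate (n.toNat - k) (List.replicate n.toNat (0:Int)) := by
  have hbN : n.toNat ≤ board.length := by omega
  intro k
  induction k with
  | zero =>
    rw [show PySem.List.pyRange 0 ((0:Nat):Int) 1 = [] from
      PySem.List.pyRange_one_eq_nil (by omega)]
    simp
  | succ k ih =>
    intro hk1
    have hk : k ≤ n.toNat := by omega
    have hkb : k < board.length := by omega
    have hrng : PySem.List.pyRange 0 ((k+1 : Nat) : Int) 1
        = PySem.List.pyRange 0 (k : Int) 1 ++ [(k : Int)] := by
      push_cast
      exact PySem.List.pyRange_one_succ_right (by omega)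
    rw [hrng, List.foldl_append, ih hk]
    simp only [List.foldl_cons, List.foldl_nil, List.map_append, List.map_cons, List.map_nil]
    have hlenmap : ((PySem.List.pyRange 0 (k:Int) 1).map
        (fun i => pvRow n (PySem.List.pyGetD board i []))).length = k := by
      simp [PySem.List.length_pyRange_one]
    have hget : PySem.List.pyGetD board (k : Int) [] = board[k] := by
      rw [PySem.List.pyGetD_natCast]; exact List.getD_eq_getElem _ _ hkb
    have hmem : board[k] ∈ board.take n.toNat := by
      have hkt : k < (board.take n.toNat).length := by simp [List.length_take]; omega
      have hgt : (board.take n.toNat)[k] = board[k] := List.getElem_take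
      rw [← hgt]; exact List.getElem_mem hkt
    have hr : n ≤ ((PySem.List.pyGetD board (k : Int) []).length : Int) := by
      rw [hget]; exact hrows _ hmem
    have hKlt : k < (((PySem.List.pyRange 0 (k:Int) 1).map
        (fun i => pvRow n (PySem.List.pyGetD board i [])))
      ++ List.replicate (n.toNat - k) (List.replicate n.toNat (0:Int))).length := by
      simp only [List.length_append, hlenmap, List.length_replicate]; omega
    have hTk : (((PySem.List.pyRange 0 (k:Int) 1).map
        (fun i => pvRow n (PySem.List.pyGetD board i [])))
      ++ List.replicate (n.toNat - k) (List.replicate n.toNat (0:Int)))[k]'hKlt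
        = List.replicate n.toNat (0:Int) := by
      rw [List.getElem_append_right (by rw [hlenmap])]
      simp [hlenmap]
    have H := pv_inner n hn (PySem.List.pyGetD board (k : Int) []) hr _ k hKlt hTk n.toNat
      (le_refl _)
    rw [Int.toNat_of_nonneg hn] at H
    rw [H]
    simp only
    rw [List.set_append_right _ _ (by rw [hlenmap]), hlenmap, Nat.sub_self,
        show n.toNat - k = (n.toNat - (k+1)) + 1 by omega, List.replicate_succ,
        List.set_cons_zero, List.append_assoc]
    congr 2

-- inserting 0 (key false) into zeros ++ nonzeros lands after the zeros
theorem pv_insert_zero (zs ns : List Int) (hz : ∀ z ∈ zs, z = 0)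
    (hns : ∀ y ∈ ns.head?, y ≠ 0) :
    PySem.List.insertBy
      (fun a b => decide ((decide (a ≠ 0)) < (decide (b ≠ 0)))) 0 (zs ++ ns)
    = zs ++ 0 :: ns := by
  induction zs with
  | nil =>
    cases ns with
    | nil => rfl
    | cons y t =>
      have hy : y ≠ 0 := hns y (by simp)
      simp [PySem.List.insertBy, hy]
  | cons z zs ih =>
    have hz0 : z = 0 := hz z (by simp)
    simp only [List.cons_append, PySem.List.insertBy]
    rw [if_neg (by simp [hz0]), ih (fun a ha => hz a (by simp [ha]))]

-- stable sort by the boolean key 'x ≠ 0' partitions: zeros first (in order), then nonzeros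
theorem pv_sorted_bool (xs : List Int) :
    PySem.List.sorted xs (fun x => decide (x ≠ 0)) false
    = xs.filter (fun x => decide (x = 0)) ++ xs.filter (fun x => decide (x ≠ 0)) := by
  rw [PySem.List.sorted_eq_foldl_insertBy]
  induction xs using List.reverseRecOn with
  | nil => rfl
  | append_singleton ys x ih =>
    rw [List.foldl_append, List.foldl_cons, List.foldl_nil, ih]
    by_cases hx : x = 0
    · subst hx
      rw [pv_insert_zero _ _ (fun z hz => by simpa using (List.of_mem_filter hz))
          (fun y hy => by
            have := List.mem_of_mem_head? hy
            simpa using (List.of_mem_filter this))]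
      simp
    · rw [PySem.List.insertBy_of_forall_not_before _ _ _
        (fun y _ => by simp [hx, Bool.lt_iff])]
      simp [hx, List.filter_append]

-- B's per-row sort is pvRow (needs the row to have at least n cells)
theorem pv_rowB (n : Int) (hn : 0 ≤ n) (r : List Int) (hr : n ≤ (r.length : Int)) :
    PySem.List.sorted ((PySem.List.slice r none (some n)).reverse)
      (fun x => decide (x ≠ 0)) false = pvRow n r := by
  rw [PySem.List.slice_to _ hn, pv_sorted_bool, List.filter_reverse, List.filter_reverse]
  have hzero : (r.take n.toNat).filter (fun x => decide (x = 0))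
      = List.replicate ((r.take n.toNat).filter (fun x => decide (x = 0))).length 0 := by
    apply List.eq_replicate_of_mem
    intro b hb
    simpa using List.of_mem_filter hb
  have hsplit := List.length_eq_length_filter_add (l := r.take n.toNat)
    (fun x => decide (x = 0))
  have hnot : (r.take n.toNat).filter (fun x => !(decide (x = 0)))
      = (r.take n.toNat).filter (fun x => decide (x ≠ 0)) := by
    apply List.filter_congr
    intro a _; simp
  rw [hnot] at hsplit
  have h2 : (r.take n.toNat).length = n.toNat := by
    simp [List.length_take]; omega
  conv_lhs => rw [hzero]
  rw [List.reverse_replicate]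
  simp only [pvRow, pvVals]
  congr 2
  omega

theorem shifting_eq_alt (board : List (List Int)) (n : Int) (h : Pre_shifting board n) :
    shifting board n = shifting_alt board n := by
  obtain ⟨hb, hrows⟩ := h
  simp only [shifting, shifting_alt]
  by_cases hn : 0 ≤ n
  · have htemp0 : (PySem.List.pyRange 0 n 1).map
        (fun _ => (PySem.List.pyRange 0 n 1).map (fun _ => (0:Int)))
        = List.replicate n.toNat (List.replicate n.toNat (0:Int)) := by
      rw [List.map_const', List.map_const', PySem.List.length_pyRange_one, Int.sub_zero]
    have hA := pv_outer board n hn hb hrows n.toNat (le_refl _)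
    rw [Int.toNat_of_nonneg hn] at hA
    rw [htemp0, hA, Nat.sub_self, List.replicate_zero, List.append_nil]
    rw [List.map_congr_left]
    intro i hi
    have hi' : 0 ≤ i ∧ i < n := by
      have := PySem.List.mem_pyRange_one.mp hi
      omega
    have hib : i.toNat < board.length := by omega
    have hget : PySem.List.pyGetD board i [] = board[i.toNat] := by
      rw [PySem.List.pyGetD_eq_getElem _ _ hi'.1 (by omega)]
    have hmem : board[i.toNat] ∈ board.take n.toNat := by
      have hkt : i.toNat < (board.take n.toNat).length := by simp [List.length_take]; omega
      have hgt : (board.take n.toNat)[i.toNat] = board[i.toNat] := List.getElem_take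
      rw [← hgt]; exact List.getElem_mem hkt
    have hr : n ≤ ((PySem.List.pyGetD board i []).length : Int) := by
      rw [hget]; exact hrows _ hmem
    exact (pv_rowB n hn _ hr).symm
  · rw [PySem.List.pyRange_one_eq_nil (by omega)]
    simp

-- ===== VERDICT (by name: the statement is the Claim_ definition above) =====
theorem shifting_spec : Claim_equal_shifting := by
  intro board n _ hPre
  unfold Spec_shifting
  exact shifting_eq_alt board n hPre
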